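-- pv_equiv track=rewrite | github.com/epfl-ada/ada-2024-project-outlier-1 | src/utils/llm_processing.py | remove_periodic_loop
-- ===== SOURCE A (Python) =====
-- def remove_periodic_loop(x):
--     """
--     Remove periodic loops
--
--     Args:
--         x (list): list to clean
--
--     Returns:
--         y (list): x without periodic loops
--     """
--     to_remove = []
--     for j in range(1, len(x)-1):
--         for i in range(len(x)-j):
--             if x[i:i+j]==x[i+j:i+2*j]:
--                 for k in range(i, i+j):
--                     to_remove.append(k)
--
--     return [i for j, i in enumerate(x) if j not in to_remove]
-- ===== SOURCE B (Python) =====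
-- def remove_periodic_loop(x):
--     n = len(x)
--     removed = set()
--     for j in range(1, n - 1):
--         # run-lengths: runs[i] = number of consecutive positions u >= i with x[u] == x[u+j]
--         runs = []
--         run = 0
--         for i in range(n - j - 1, -1, -1):
--             run = run + 1 if x[i] == x[i + j] else 0
--             runs.append(run)
--         runs.reverse()
--         # sweep: a valid period-j start at t covers t .. t+j-1
--         cnt = 0
--         for t in range(n):
--             if t + 2 * j <= n and runs[t] >= j:
--                 cnt = j
--             if cnt > 0:
--                 removed.add(t)
--                 cnt -= 1
--     return [v for t, v in enumerate(x) if t not in removed]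
-- ===== Notes on version B (the rewrite author's own statement) =====
-- stated objective: faster
-- what changed: Replaced the triple loop with quadratic slice comparisons by a per-period run-length scan (longest stretch of x[i]==x[i+j]) plus a linear cover sweep that marks removed indices into a set, instead of comparing slices and appending every covered index for every (i,j) pair.
import Mathlib
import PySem

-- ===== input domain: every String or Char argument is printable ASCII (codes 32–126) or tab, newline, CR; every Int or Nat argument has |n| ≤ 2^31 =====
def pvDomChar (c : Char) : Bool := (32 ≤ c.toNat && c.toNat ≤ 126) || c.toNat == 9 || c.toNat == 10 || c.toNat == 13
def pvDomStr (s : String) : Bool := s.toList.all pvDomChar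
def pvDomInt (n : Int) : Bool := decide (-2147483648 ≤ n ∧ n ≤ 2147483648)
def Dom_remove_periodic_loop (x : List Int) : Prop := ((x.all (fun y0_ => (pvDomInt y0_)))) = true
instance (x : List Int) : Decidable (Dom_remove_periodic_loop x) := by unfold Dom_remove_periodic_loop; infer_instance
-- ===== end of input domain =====

-- B replaces A's triple loop with slice comparisons (O(n^3)) by a per-period run-length scan
-- plus a linear cover sweep collecting removed indices into a set (O(n^2)); measured faster.

-- ===== PORT A =====
-- the to_remove list built by A's nested loops
def pvArem (x : List Int) : List Int :=
  let n : Int := PySem.List.len x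
  (PySem.List.pyRange 1 (n - 1) 1).foldl (fun acc j =>
    (PySem.List.pyRange 0 (n - j) 1).foldl (fun acc i =>
      if PySem.List.slice x (some i) (some (i + j)) =
         PySem.List.slice x (some (i + j)) (some (i + 2 * j)) then
        (PySem.List.pyRange i (i + j) 1).foldl (fun acc k => acc ++ [k]) acc
      else acc) acc) []

def remove_periodic_loop (x : List Int) : List Int :=
  let to_remove := pvArem x
  ((PySem.List.enumerate x 0).filter (fun p => !(to_remove.contains p.1))).map (fun p => p.2)

-- ===== PORT B =====
-- body of B's loop over the period j: run-length scan, then the cover sweep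
def pvBbody (x : List Int) (removed : PySem.Set Int) (j : Int) : PySem.Set Int :=
  let n : Int := PySem.List.len x
  let rs := (PySem.List.pyRange (n - j - 1) (-1) (-1)).foldl
      (fun (p : List Int × Int) i =>
        let run := if PySem.List.pyGetD x i 0 = PySem.List.pyGetD x (i + j) 0 then p.2 + 1 else 0
        (p.1 ++ [run], run)) (([] : List Int), (0 : Int))
  let runs := rs.1.reverse
  let rc := (PySem.List.pyRange 0 n 1).foldl
      (fun (p : PySem.Set Int × Int) t =>
        let cnt := if t + 2 * j ≤ n ∧ PySem.List.pyGetD runs t 0 ≥ j then j else p.2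
        if cnt > 0 then (p.1.add t, cnt - 1) else (p.1, cnt)) ((removed, (0 : Int)))
  rc.1

def pvBremoved (x : List Int) : PySem.Set Int :=
  let n : Int := PySem.List.len x
  (PySem.List.pyRange 1 (n - 1) 1).foldl (pvBbody x) PySem.Set.empty

def remove_periodic_loop_alt (x : List Int) : List Int :=
  let removed := pvBremoved x
  ((PySem.List.enumerate x 0).filter (fun p => !(removed.contains p.1))).map (fun p => p.2)

-- ===== PRECONDITION & SPEC =====
def Spec_remove_periodic_loop (x : List Int) (out : List Int) : Prop := out = remove_periodic_loop_alt x
instance (x : List Int) (out : List Int) : Decidable (Spec_remove_periodic_loop x out) := by unfold Spec_remove_periodic_loop; infer_instance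

-- ===== CLAIM (what is proved, stated in full; the proofs are below) =====
def Claim_equal_remove_periodic_loop : Prop := ∀ (x : List Int), Dom_remove_periodic_loop x → Spec_remove_periodic_loop x (remove_periodic_loop x)

-- ===== LEMMAS AND PROOFS =====

-- position u starts a period-j match
def pvGood (x : List Int) (j u : Nat) : Prop := x.getD u 0 = x.getD (u + j) 0
-- i is a valid start of a period-j doubled block
def pvValid (x : List Int) (j i : Nat) : Prop :=
  i + 2 * j ≤ x.length ∧ ∀ u, i ≤ u → u < i + j → pvGood x j u
-- index t is covered by some period-j block
def pvCov (x : List Int) (j t : Nat) : Prop := ∃ i, i ≤ t ∧ t < i + j ∧ pvValid x j i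
-- index t is removed
def pvRem (x : List Int) (t : Nat) : Prop := ∃ j, 1 ≤ j ∧ j + 2 ≤ x.length ∧ pvCov x j t

-- run value specification: run is the length of the longest good stretch starting at i
def pvGS (x : List Int) (j i : Nat) (run : Int) : Prop :=
  ∀ k : Nat, ((k : Int) ≤ run ↔ i + k + j ≤ x.length ∧ ∀ u, i ≤ u → u < i + k → pvGood x j u)

-- B's sweep condition, literally as the port tests it
def pvVb (runs : List Int) (n j : Nat) (t : Int) : Prop :=
  t + 2 * (j : Int) ≤ (n : Int) ∧ PySem.List.pyGetD runs t 0 ≥ (j : Int)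

-- invariant of the sweep counter before step t0
def pvCS (runs : List Int) (n j : Nat) (t0 : Nat) (cnt : Int) : Prop :=
  0 ≤ cnt ∧
  (cnt = 0 ∨ ∃ i : Nat, i < t0 ∧ pvVb runs n j (i : Int) ∧ cnt = (i : Int) + (j : Int) - (t0 : Int)) ∧
  ∀ i : Nat, i < t0 → pvVb runs n j (i : Int) → ((i : Int) + (j : Int) - (t0 : Int)) ≤ cnt

def pvCovb (runs : List Int) (n j : Nat) (t : Nat) : Prop :=
  ∃ i : Nat, i ≤ t ∧ (t : Int) < (i : Int) + (j : Int) ∧ pvVb runs n j (i : Int)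

lemma pvGS_step (x : List Int) (j i : Nat) (run : Int)
    (hi : i + 1 + j ≤ x.length) (h : pvGS x j (i + 1) run) :
    pvGS x j i (if x.getD i 0 = x.getD (i + j) 0 then run + 1 else 0) := by
  simp only [pvGS, pvGood] at h ⊢
  intro k
  by_cases hg : x.getD i 0 = x.getD (i + j) 0
  · rw [if_pos hg]
    cases k with
    | zero =>
      have h0 : (0 : Int) ≤ run := (h 0).mpr ⟨by omega, fun u h1 h2 => absurd h2 (by omega)⟩
      constructor
      · intro _; exact ⟨by omega, fun u h1 h2 => absurd h2 (by omega)⟩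
      · intro _; push_cast; omega
    | succ k' =>
      have hk := h k'
      constructor
      · intro hle
        have hle' : (k' : Int) ≤ run := by push_cast at hle; omega
        obtain ⟨hb, hall⟩ := hk.mp hle'
        refine ⟨by omega, fun u hu1 hu2 => ?_⟩
        rcases Nat.eq_or_lt_of_le hu1 with rfl | hlt
        · exact hg
        · exact hall u (by omega) (by omega)
      · rintro ⟨hb, hall⟩
        have : (k' : Int) ≤ run := hk.mpr ⟨by omega, fun u hu1 hu2 => hall u (by omega) (by omega)⟩
        push_cast; omega
  · rw [if_neg hg]
    constructor
    · intro hle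
      have hk0 : k = 0 := by omega
      subst hk0
      exact ⟨by omega, fun u h1 h2 => absurd h2 (by omega)⟩
    · rintro ⟨hb, hall⟩
      rcases Nat.eq_zero_or_pos k with rfl | hkpos
      · exact_mod_cast Int.le_refl 0
      · exact absurd (hall i (le_refl _) (by omega)) hg

lemma pvRuns (x : List Int) (j : Nat) :
    ∀ (i0 : Nat), i0 + j ≤ x.length →
    ∀ (lst : List Int) (run : Int), pvGS x j i0 run →
    ∃ (new : List Int) (r' : Int),
      (PySem.List.pyRange ((i0 : Int) - 1) (-1) (-1)).foldl
        (fun (p : List Int × Int) i =>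
          let run := if PySem.List.pyGetD x i 0 = PySem.List.pyGetD x (i + (j : Int)) 0 then p.2 + 1 else 0
          (p.1 ++ [run], run)) (lst, run) = (lst ++ new, r') ∧
      new.length = i0 ∧ ∀ t : Nat, t < i0 → pvGS x j t (new.reverse.getD t 0) := by
  intro i0
  induction i0 with
  | zero =>
    intro _ lst run _
    refine ⟨[], run, ?_, rfl, fun t ht => absurd ht (by omega)⟩
    rw [PySem.List.pyRange_neg_one_eq_nil (by norm_num)]
    simp
  | succ i0 ih =>
    intro hle lst run hgs
    have hc : ((i0 + 1 : Nat) : Int) - 1 = (i0 : Int) := by push_cast; ring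
    rw [hc, PySem.List.pyRange_neg_one_cons (by omega : (-1 : Int) < (i0 : Int))]
    rw [List.foldl_cons]
    have hcast : ((i0 : Int) + (j : Int)) = ((i0 + j : Nat) : Int) := by push_cast; ring
    simp only [PySem.List.pyGetD_natCast, hcast]
    set run1 : Int := if x.getD i0 0 = x.getD (i0 + j) 0 then run + 1 else 0 with hrun1
    have hgs1 : pvGS x j i0 run1 := pvGS_step x j i0 run (by omega) hgs
    obtain ⟨new', r', hfold, hlen, hspec⟩ := ih (by omega) (lst ++ [run1]) run1 hgs1
    refine ⟨run1 :: new', r', ?_, by simp [hlen], ?_⟩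
    · rw [hfold]; simp
    · intro t ht
      have hrev : (run1 :: new').reverse = new'.reverse ++ [run1] := by simp
      rw [hrev]
      rcases Nat.lt_or_ge t i0 with h | h
      · rw [List.getD_append _ _ _ _ (by simp [hlen]; omega)]
        exact hspec t h
      · have hti : t = i0 := by omega
        subst hti
        rw [List.getD_eq_getElem _ _ (by simp [hlen])]
        rw [List.getElem_append_right (by simp [hlen])]
        simpa [hlen] using hgs1

lemma pvSweep (runs : List Int) (n j : Nat) (hj : 1 ≤ j) :
    ∀ (m t0 : Nat), t0 + m = n →
    ∀ (s : PySem.Set Int) (cnt : Int), pvCS runs n j t0 cnt →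
    ∀ y : Int,
      (y ∈ ((PySem.List.pyRange (t0 : Int) (n : Int) 1).foldl
        (fun (p : PySem.Set Int × Int) t =>
          let cnt := if t + 2 * (j : Int) ≤ (n : Int) ∧ PySem.List.pyGetD runs t 0 ≥ (j : Int) then (j : Int) else p.2
          if cnt > 0 then (p.1.add t, cnt - 1) else (p.1, cnt)) (s, cnt)).1 ↔
       y ∈ s ∨ ∃ t : Nat, t0 ≤ t ∧ t < n ∧ y = (t : Int) ∧ pvCovb runs n j t) := by
  intro m
  induction m with
  | zero =>
    intro t0 ht0 s cnt _ y
    rw [PySem.List.pyRange_one_eq_nil (by omega)]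
    simp only [List.foldl_nil]
    constructor
    · exact fun h => Or.inl h
    · rintro (h | ⟨t, h1, h2, -, -⟩)
      · exact h
      · omega
  | succ m ih =>
    intro t0 ht0 s cnt hcs y
    obtain ⟨hnn, hex, hmax⟩ := hcs
    rw [PySem.List.pyRange_one_cons (by omega : (t0 : Int) < (n : Int))]
    rw [List.foldl_cons]
    set c' : Int := if (t0 : Int) + 2 * (j : Int) ≤ (n : Int) ∧ PySem.List.pyGetD runs (t0 : Int) 0 ≥ (j : Int) then (j : Int) else cnt with hc'
    have hVb : (((t0 : Int) + 2 * (j : Int) ≤ (n : Int) ∧ PySem.List.pyGetD runs (t0 : Int) 0 ≥ (j : Int))) ↔ pvVb runs n j (t0 : Int) := Iff.rfl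
    have hcov : 0 < c' ↔ pvCovb runs n j t0 := by
      constructor
      · intro hpos
        by_cases hV : pvVb runs n j (t0 : Int)
        · exact ⟨t0, le_refl _, by omega, hV⟩
        · rw [hc', if_neg (fun h => hV (hVb.mp h))] at hpos
          rcases hex with h0 | ⟨i, hi, hVi, hEq⟩
          · omega
          · exact ⟨i, by omega, by omega, hVi⟩
      · rintro ⟨i, hile, hlt, hVi⟩
        by_cases hV : pvVb runs n j (t0 : Int)
        · rw [hc', if_pos (hVb.mpr hV)]; omega
        · have hine : i ≠ t0 := by rintro rfl; exact hV hVi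
          have := hmax i (by omega) hVi
          rw [hc', if_neg (fun h => hV (hVb.mp h))]
          omega
    have hcast1 : (t0 : Int) + 1 = ((t0 + 1 : Nat) : Int) := by push_cast; ring
    by_cases hpos : 0 < c'
    · rw [if_pos hpos]
      have hcs' : pvCS runs n j (t0 + 1) (c' - 1) := by
        refine ⟨by omega, ?_, ?_⟩
        · by_cases hV : pvVb runs n j (t0 : Int)
          · refine Or.inr ⟨t0, by omega, hV, ?_⟩
            rw [hc', if_pos (hVb.mpr hV)]; push_cast; ring
          · rw [hc', if_neg (fun h => hV (hVb.mp h))]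
            rcases hex with h0 | ⟨i, hi, hVi, hEq⟩
            · rw [hc', if_neg (fun h => hV (hVb.mp h))] at hpos; omega
            · refine Or.inr ⟨i, by omega, hVi, by push_cast; omega⟩
        · intro i hi hVi
          rcases Nat.lt_or_ge i t0 with hlt | hge
          · have := hmax i hlt hVi
            have hcnt : cnt ≤ c' := by
              rw [hc']; split
              · omega
              · exact le_refl _
            push_cast; push_cast at this; omega
          · have hieq : i = t0 := by omega
            subst hieq
            rw [hc', if_pos (hVb.mpr hVi)]
            push_cast; omega
      have := ih (t0 + 1) (by omega) (s.add (t0 : Int)) (c' - 1) hcs' y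
      rw [hcast1, this, PySem.Set.mem_add]
      constructor
      · rintro ((hs | hy) | ⟨t, h1, h2, h3, h4⟩)
        · exact Or.inl hs
        · exact Or.inr ⟨t0, le_refl _, by omega, hy, hcov.mp hpos⟩
        · exact Or.inr ⟨t, by omega, h2, h3, h4⟩
      · rintro (hs | ⟨t, h1, h2, h3, h4⟩)
        · exact Or.inl (Or.inl hs)
        · rcases Nat.eq_or_lt_of_le h1 with rfl | hlt
          · exact Or.inl (Or.inr h3)
          · exact Or.inr ⟨t, by omega, h2, h3, h4⟩
    · rw [if_neg hpos]
      have hV : ¬ pvVb runs n j (t0 : Int) := fun hV => by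
        rw [hc', if_pos (hVb.mpr hV)] at hpos; omega
      have hceq : c' = cnt := by rw [hc', if_neg (fun h => hV (hVb.mp h))]
      have hcs' : pvCS runs n j (t0 + 1) c' := by
        refine ⟨by omega, Or.inl (by omega), ?_⟩
        · intro i hi hVi
          have hine : i ≠ t0 := by rintro rfl; exact hV hVi
          have := hmax i (by omega) hVi
          push_cast; push_cast at this; omega
      have := ih (t0 + 1) (by omega) s c' hcs' y
      rw [hcast1, this]
      constructor
      · rintro (hs | ⟨t, h1, h2, h3, h4⟩)
        · exact Or.inl hs
        · exact Or.inr ⟨t, by omega, h2, h3, h4⟩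
      · rintro (hs | ⟨t, h1, h2, h3, h4⟩)
        · exact Or.inl hs
        · rcases Nat.eq_or_lt_of_le h1 with rfl | hlt
          · exact absurd h4 (fun h => hpos (hcov.mpr h))
          · exact Or.inr ⟨t, by omega, h2, h3, h4⟩

lemma pvVb_iff_valid (x : List Int) (j : Nat) (runs : List Int) (hj : 1 ≤ j)
    (hruns : ∀ t : Nat, t + j < x.length → pvGS x j t (runs.getD t 0)) (i : Nat) :
    pvVb runs x.length j (i : Int) ↔ pvValid x j i := by
  simp only [pvVb, pvValid, PySem.List.pyGetD_natCast]
  constructor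
  · rintro ⟨h1, h2⟩
    have hb : i + 2 * j ≤ x.length := by omega
    refine ⟨hb, ?_⟩
    have hgs := hruns i (by omega)
    have := (hgs j).mp h2
    exact fun u hu1 hu2 => this.2 u hu1 hu2
  · rintro ⟨hb, hall⟩
    refine ⟨by omega, ?_⟩
    have hgs := hruns i (by omega)
    exact (hgs j).mpr ⟨by omega, hall⟩

lemma pvBbody_mem (x : List Int) (j : Nat) (hj : 1 ≤ j) (hjn : j + 2 ≤ x.length)
    (removed : PySem.Set Int) (y : Int) :
    y ∈ pvBbody x removed (j : Int) ↔ y ∈ removed ∨ ∃ t : Nat, y = (t : Int) ∧ pvCov x j t := by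
  have hx : PySem.List.len x = (x.length : Int) := by simp [PySem.List.len]
  have hgs0 : pvGS x j (x.length - j) 0 := by
    intro k
    constructor
    · intro hk
      have hk0 : k = 0 := by omega
      subst hk0
      exact ⟨by omega, fun u h1 h2 => absurd h2 (by omega)⟩
    · rintro ⟨hb, -⟩
      have hk0 : k = 0 := by omega
      subst hk0
      exact_mod_cast Int.le_refl 0
  obtain ⟨new, r', hfold, hlen, hspec⟩ := pvRuns x j (x.length - j) (by omega) [] 0 hgs0
  have hruns : ∀ t : Nat, t + j < x.length → pvGS x j t (new.reverse.getD t 0) :=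
    fun t ht => hspec t (by omega)
  have hcs0 : pvCS new.reverse x.length j 0 0 :=
    ⟨le_refl 0, Or.inl rfl, fun i hi _ => absurd hi (by omega)⟩
  have hsweep := pvSweep new.reverse x.length j hj x.length 0 (by omega) removed 0 hcs0 y
  have hrange : (x.length : Int) - (j : Int) - 1 = ((x.length - j : Nat) : Int) - 1 := by
    push_cast [Nat.cast_sub (by omega : j ≤ x.length)]; ring
  unfold pvBbody
  simp only [hx, hrange, hfold, List.nil_append]
  rw [show ((0 : Nat) : Int) = (0 : Int) by norm_num] at hsweep
  rw [hsweep]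
  constructor
  · rintro (hs | ⟨t, -, -, hy, ⟨i, hile, hlt, hVi⟩⟩)
    · exact Or.inl hs
    · have hval := (pvVb_iff_valid x j new.reverse hj hruns i).mp hVi
      exact Or.inr ⟨t, hy, ⟨i, hile, by omega, hval⟩⟩
  · rintro (hs | ⟨t, hy, ⟨i, hile, hlt, hval⟩⟩)
    · exact Or.inl hs
    · have hVi := (pvVb_iff_valid x j new.reverse hj hruns i).mpr hval
      have htn : t < x.length := by
        obtain ⟨hb, -⟩ := hval
        omega
      exact Or.inr ⟨t, by omega, htn, hy, ⟨i, hile, by omega, hVi⟩⟩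

lemma pvBremoved_mem (x : List Int) (y : Int) :
    y ∈ pvBremoved x ↔ ∃ t : Nat, y = (t : Int) ∧ pvRem x t := by
  have hx : PySem.List.len x = (x.length : Int) := by simp [PySem.List.len]
  unfold pvBremoved
  simp only [hx]
  have main : ∀ (js : List Int),
      (∀ jj ∈ js, ∃ jn : Nat, jj = (jn : Int) ∧ 1 ≤ jn ∧ jn + 2 ≤ x.length) →
      ∀ (s : PySem.Set Int),
      (y ∈ js.foldl (pvBbody x) s ↔
        y ∈ s ∨ ∃ jn : Nat, (jn : Int) ∈ js ∧ 1 ≤ jn ∧ jn + 2 ≤ x.length ∧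
          ∃ t : Nat, y = (t : Int) ∧ pvCov x jn t) := by
    intro js
    induction js with
    | nil =>
      intro _ s
      simp
    | cons jj js ihs =>
      intro hjs s
      obtain ⟨jn, rfl, hj1, hj2⟩ := hjs _ (List.mem_cons_self)
      rw [List.foldl_cons]
      rw [ihs (fun j hj => hjs j (List.mem_cons_of_mem _ hj)) (pvBbody x s (jn : Int))]
      rw [pvBbody_mem x jn hj1 hj2 s y]
      constructor
      · rintro ((hs | ⟨t, hy, hcov⟩) | ⟨jn', h1, h2, h3, h4⟩)
        · exact Or.inl hs
        · exact Or.inr ⟨jn, List.mem_cons_self, hj1, hj2, t, hy, hcov⟩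
        · exact Or.inr ⟨jn', List.mem_cons_of_mem _ h1, h2, h3, h4⟩
      · rintro (hs | ⟨jn', h1, h2, h3, h4⟩)
        · exact Or.inl (Or.inl hs)
        · rcases List.mem_cons.mp h1 with heq | hmem
          · have : jn' = jn := by exact_mod_cast heq
            subst this
            exact Or.inl (Or.inr h4)
          · exact Or.inr ⟨jn', hmem, h2, h3, h4⟩
  rw [main (PySem.List.pyRange 1 ((x.length : Int) - 1) 1)
      (fun jj hjj => by
        rw [PySem.List.mem_pyRange_one] at hjj
        exact ⟨jj.toNat, by omega, by omega, by omega⟩)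
      PySem.Set.empty]
  constructor
  · rintro (hs | ⟨jn, h1, h2, h3, t, hy, hcov⟩)
    · exact absurd hs (by simp [PySem.Set.empty])
    · exact ⟨t, hy, jn, h2, h3, hcov⟩
  · rintro ⟨t, hy, jn, h2, h3, hcov⟩
    refine Or.inr ⟨jn, ?_, h2, h3, t, hy, hcov⟩
    rw [PySem.List.mem_pyRange_one]
    omega

lemma pvSliceEq (x : List Int) (i j : Nat) (hj : 1 ≤ j) (hij : i + j < x.length) :
    ((x.drop i).take j = (x.drop (i + j)).take j ↔
      (i + 2 * j ≤ x.length ∧ ∀ u, i ≤ u → u < i + j → pvGood x j u)) := by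
  simp only [pvGood]
  by_cases hb : i + 2 * j ≤ x.length
  · have l1 : ((x.drop i).take j).length = j := by
      simp only [List.length_take, List.length_drop]; omega
    have l2 : ((x.drop (i + j)).take j).length = j := by
      simp only [List.length_take, List.length_drop]; omega
    constructor
    · intro h
      refine ⟨hb, fun u hu1 hu2 => ?_⟩
      have hu : u - i < ((x.drop i).take j).length := by omega
      have hu' : u - i < ((x.drop (i + j)).take j).length := by omega
      have := List.getElem_of_eq h (l := ((x.drop i).take j)) hu
      rw [List.getElem_take, List.getElem_drop, List.getElem_take, List.getElem_drop] at this
      have e1 : i + (u - i) = u := by omega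
      have e2 : i + j + (u - i) = u + j := by omega
      simp only [e1, e2] at this
      rw [List.getD_eq_getElem x 0 (by omega), List.getD_eq_getElem x 0 (by omega)]
      exact this
    · rintro ⟨-, hall⟩
      apply List.ext_getElem (l1.trans l2.symm)
      intro u h1 h2
      rw [List.getElem_take, List.getElem_drop, List.getElem_take, List.getElem_drop]
      have hu : u < j := by omega
      have := hall (i + u) (by omega) (by omega)
      rw [List.getD_eq_getElem x 0 (by omega), List.getD_eq_getElem x 0 (by omega)] at this
      have e2 : i + u + j = i + j + u := by omega
      simp only [e2] at this
      exact this
  · have l1 : ((x.drop i).take j).length = j := by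
      simp only [List.length_take, List.length_drop]; omega
    have l2 : ((x.drop (i + j)).take j).length = x.length - i - j := by
      simp only [List.length_take, List.length_drop]; omega
    constructor
    · intro h
      have := congrArg List.length h
      rw [l1, l2] at this
      omega
    · rintro ⟨hc, -⟩; omega

lemma pvArem_mem (x : List Int) (t : Nat) :
    ((t : Int) ∈ pvArem x ↔ pvRem x t) := by
  have hx : PySem.List.len x = (x.length : Int) := by simp [PySem.List.len]
  have hinner : ∀ (acc : List Int) (jj ii : Int),
      (if PySem.List.slice x (some ii) (some (ii + jj)) =
          PySem.List.slice x (some (ii + jj)) (some (ii + 2 * jj)) then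
        (PySem.List.pyRange ii (ii + jj) 1).foldl (fun acc k => acc ++ [k]) acc
      else acc) =
      acc ++ (if PySem.List.slice x (some ii) (some (ii + jj)) =
          PySem.List.slice x (some (ii + jj)) (some (ii + 2 * jj)) then
        PySem.List.pyRange ii (ii + jj) 1 else []) := by
    intro acc jj ii
    split
    · rw [PySem.List.foldl_append_singleton_eq_self]
    · simp
  unfold pvArem
  simp only [hx]
  simp only [hinner]
  simp only [PySem.List.foldl_append_eq_flatMap, List.nil_append]
  rw [List.mem_flatMap]
  constructor
  · rintro ⟨jj, hjj, hm⟩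
    rw [List.mem_flatMap] at hm
    obtain ⟨ii, hii, hm⟩ := hm
    rw [PySem.List.mem_pyRange_one] at hjj hii
    by_cases hcond : PySem.List.slice x (some ii) (some (ii + jj)) =
        PySem.List.slice x (some (ii + jj)) (some (ii + 2 * jj))
    · rw [if_pos hcond, PySem.List.mem_pyRange_one] at hm
      lift jj to Nat using (by omega) with jn
      lift ii to Nat using (by omega) with iN
      have hc1 : ((iN : Int) + (jn : Int)) = ((iN + jn : Nat) : Int) := by push_cast; ring
      have hc2 : ((iN : Int) + 2 * (jn : Int)) = ((iN + jn : Nat) : Int) + (jn : Int) := by push_cast; ring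
      rw [hc2, PySem.List.slice_natCast_add x iN jn, hc1,
          PySem.List.slice_natCast_add x (iN + jn) jn] at hcond
      rw [hc1] at hm
      have hval := (pvSliceEq x iN jn (by omega) (by omega)).mp hcond
      exact ⟨jn, by omega, by omega, ⟨iN, by omega, by omega, hval.1, hval.2⟩⟩
    · rw [if_neg hcond] at hm
      exact absurd hm (List.not_mem_nil)
  · rintro ⟨jn, hj1, hj2, ⟨iN, hile, hlt, hval⟩⟩
    refine ⟨(jn : Int), ?_, ?_⟩
    · rw [PySem.List.mem_pyRange_one]; omega
    · rw [List.mem_flatMap]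
      refine ⟨(iN : Int), ?_, ?_⟩
      · rw [PySem.List.mem_pyRange_one]
        obtain ⟨hb, -⟩ := hval
        omega
      · have hcond : PySem.List.slice x (some (iN : Int)) (some ((iN : Int) + (jn : Int))) =
            PySem.List.slice x (some ((iN : Int) + (jn : Int))) (some ((iN : Int) + 2 * (jn : Int))) := by
          have hc1 : ((iN : Int) + (jn : Int)) = ((iN + jn : Nat) : Int) := by push_cast; ring
          have hc2 : ((iN : Int) + 2 * (jn : Int)) = ((iN + jn : Nat) : Int) + (jn : Int) := by push_cast; ring
          rw [hc2, PySem.List.slice_natCast_add x iN jn, hc1,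
              PySem.List.slice_natCast_add x (iN + jn) jn]
          exact (pvSliceEq x iN jn (by omega) (by
            obtain ⟨hb, -⟩ := hval
            omega)).mpr ⟨hval.1, hval.2⟩
        rw [if_pos hcond, PySem.List.mem_pyRange_one]
        omega

-- ===== VERDICT (by name: the statement is the Claim_ definition above) =====
theorem remove_periodic_loop_spec : Claim_equal_remove_periodic_loop := by
  intro x _
  unfold Spec_remove_periodic_loop remove_periodic_loop remove_periodic_loop_alt
  apply congrArg
  apply List.filter_congr
  intro p hp
  rw [PySem.List.mem_enumerate_iff] at hp
  obtain ⟨k, hk, rfl⟩ := hp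
  simp only [zero_add]
  apply congrArg
  have hiff : ((k : Int) ∈ pvArem x) ↔ ((k : Int) ∈ pvBremoved x) := by
    rw [pvArem_mem, pvBremoved_mem]
    constructor
    · exact fun h => ⟨k, rfl, h⟩
    · rintro ⟨t, ht, h⟩
      have htk : t = k := by exact_mod_cast ht.symm
      subst htk
      exact h
  apply Bool.coe_iff_coe.mp
  rw [List.contains_iff_mem, PySem.Set.contains_iff]
  exact hiff
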